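-- pv_equiv track=rewrite | github.com/miliar/Code_Jam_Webscraper | Solutions_in_python/Problem_43/al.py | al
-- ===== SOURCE A (Python) =====
-- def p(str):
--     #print str
--     pass
--
-- def al(str):
--     l = []
--     l2 = []
--
--     lstr = len(str)
--     for i in range(lstr):
--         n = myatoi(str[i])
--         l.append(n)
--         if n not in l2:l2.append(n)
--
--     max = len(l2)
--     p(max)
--     p(l)
--     p(l2)
--     ans = 0
--     pos = 1
--     p("max")
--     p(len(l2))
--     if len(l2) > 1:
--         a = l2[0]
--         l2[0] = l2[1]
--         l2[1] = a
--     else: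
--         l2.insert(0,"0")
--         max = 2
--     l.reverse()
--     for ll in l:
--         ans += l2.index(ll) * pos
--         p("pos %d: ans %d" %(pos,ans))
--         pos *= max
--     return ans
--
-- def myatoi(i):
--     if i.isdigit():
--         n = int(i)
--     elif i.islower():
--         n = ord(i)-ord('a')+10
--     else:
--         n = ord(i)-ord('A')+10
--
--     p("%s,%d" %( i ,n))
--     return n
-- ===== SOURCE B (Python) =====
-- def myatoi(i):
--     if i.isdigit():
--         return int(i)
--     if i.islower():
--         return ord(i) - ord('a') + 10
--     return ord(i) - ord('A') + 10
--
-- def al(str):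
--     vals = [myatoi(c) for c in str]
--     order = list(dict.fromkeys(vals))
--     if len(order) < 2:
--         # a lone symbol is digit 1 in base 2
--         digit = {v: 1 for v in order}
--         base = 2
--     else:
--         order[0], order[1] = order[1], order[0]
--         digit = {v: i for i, v in enumerate(order)}
--         base = len(order)
--
--     def ev(seg):
--         # (value of seg, base ** len(seg)) by halving the segment
--         if not seg:
--             return 0, 1
--         if len(seg) == 1:
--             return digit[seg[0]], base
--         mid = len(seg) // 2
--         v1, w1 = ev(seg[:mid])
--         v2, w2 = ev(seg[mid:])
--         return v1 * w2 + v2, w1 * w2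
--
--     return ev(vals)[0]
-- ===== Notes on version B (the rewrite author's own statement) =====
-- stated objective: alternative
-- what changed: B collects the distinct symbols with dict.fromkeys, assigns digits through a dict (a lone symbol maps directly to 1, no '0' sentinel list), and evaluates the number by a recursive divide-and-conquer over the digit list that returns (value, base**len) per half and merges them, replacing A's reverse() plus pos-power accumulator with repeated l2.index scans.
import Mathlib
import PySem

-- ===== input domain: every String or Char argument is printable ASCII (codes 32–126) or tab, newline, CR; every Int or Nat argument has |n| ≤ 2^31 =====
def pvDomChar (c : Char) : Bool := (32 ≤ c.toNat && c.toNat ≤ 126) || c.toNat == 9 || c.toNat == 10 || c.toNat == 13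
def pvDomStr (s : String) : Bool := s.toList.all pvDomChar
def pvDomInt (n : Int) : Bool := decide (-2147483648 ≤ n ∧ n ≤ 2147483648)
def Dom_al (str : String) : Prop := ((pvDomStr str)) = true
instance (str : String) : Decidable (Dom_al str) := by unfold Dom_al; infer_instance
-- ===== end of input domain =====

-- B evaluates the number by a recursive divide-and-conquer over the digit list (merging (value, weight)
-- pairs of the two halves) with a dict digit assignment and no '0' sentinel, replacing A's reverse()
-- plus pos-power accumulator with repeated l2.index scans (objective: alternative).


-- ===== PORT A =====
-- shared same-module helper myatoi(i), i a one-character string;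
-- int(i) for a single ASCII digit is exactly its code minus ord('0')
def myatoi (c : Char) : Int :=
  if PySem.Chars.isdigit c then (c.toNat : Int) - ('0'.toNat : Int)
  else if PySem.Chars.islower c then (c.toNat : Int) - ('a'.toNat : Int) + 10
  else (c.toNat : Int) - ('A'.toNat : Int) + 10

def al (str : String) : Int :=
  -- for i in range(lstr): n = myatoi(str[i]); l.append(n); if n not in l2: l2.append(n)
  let p := str.toList.foldl
    (fun (p : List Int × List Int) c =>
      let n := myatoi c
      (p.1 ++ [n], if n ∈ p.2 then p.2 else p.2 ++ [n]))
    ([], [])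
  let l := p.1
  let l2 := p.2
  let mx0 : Int := PySem.List.len l2   -- max = len(l2)
  -- if len(l2) > 1: swap l2[0] and l2[1]; else: l2.insert(0, "0"); max = 2.
  -- After the insert Python's l2 mixes the string "0" with ints: modelled as
  -- Option Int, none standing for the "0" sentinel (it compares unequal to every int)
  let sw : List (Option Int) × Int :=
    if l2.length > 1 then
      let a := PySem.List.pyGetD l2 0 0
      let l2a := PySem.List.pySetD l2 0 (PySem.List.pyGetD l2 1 0)
      let l2b := PySem.List.pySetD l2a 1 a
      (l2b.map some, mx0)
    else
      (none :: l2.map some, 2)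
  -- l.reverse(); for ll in l: ans += l2.index(ll) * pos; pos *= max
  -- (l2.index never raises here — every ll occurs in l2 — so .getD 0 is unreachable)
  let res := l.reverse.foldl
    (fun (ap : Int × Int) x =>
      (ap.1 + (((PySem.List.index? sw.1 (some x)).getD 0 : Nat) : Int) * ap.2, ap.2 * sw.2))
    (0, 1)
  res.1

-- ===== PORT B =====
-- ev(seg): (value of seg, base ** len(seg)) by halving the segment; seg[:mid]/seg[mid:] = take/drop
def bev (d : PySem.Dict Int Int) (b : Int) (l : List Int) : Int × Int :=
  if h : l.length ≤ 1 then
    match l with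
    | [] => (0, 1)
    | x :: _ => (d.getD x 0, b)   -- digit[seg[0]] never raises: every digit value is a key
  else
    let mid := l.length / 2
    let p1 := bev d b (l.take mid)
    let p2 := bev d b (l.drop mid)
    (p1.1 * p2.2 + p2.1, p1.2 * p2.2)
termination_by l.length
decreasing_by
  · simp only [List.length_take]; omega
  · simp only [List.length_drop]; omega

def al_alt (str : String) : Int :=
  let vals := str.toList.map myatoi
  -- order = list(dict.fromkeys(vals)): the distinct values in first-appearance order
  let order := PySem.Set.ofList vals
  let db : PySem.Dict Int Int × Int :=
    if order.length < 2 then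
      -- digit = {v: 1 for v in order}; base = 2
      (PySem.Dict.ofList (order.map (fun v => (v, 1))), 2)
    else
      -- order[0], order[1] = order[1], order[0]; digit = {v: i for i, v in enumerate(order)}
      let order' := match order with
        | a :: b :: t => b :: a :: t
        | l => l
      (PySem.Dict.ofList (order'.zipIdx.map (fun q => (q.1, (q.2 : Int)))), (order.length : Int))
  (bev db.1 db.2 vals).1

-- ===== PRECONDITION & SPEC =====
def Spec_al (str : String) (out : Int) : Prop := out = al_alt str
instance (str : String) (out : Int) : Decidable (Spec_al str out) := by unfold Spec_al; infer_instance

-- ===== CLAIM (what is proved, stated in full; the proofs are below) =====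
def Claim_equal_al : Prop := ∀ (str : String), Dom_al str → Spec_al str (al str)

-- ===== LEMMAS AND PROOFS =====

-- the digit A assigns to rank r (slots 0 and 1 trade places)
def pvRmN (r : Nat) : Int := if r = 0 then 1 else if r = 1 then 0 else (r : Int)

-- the canonical value both ports compute, phrased as a Horner fold over the digit list
def pvVal (ds : List Int) : Int :=
  let D := PySem.Set.ofList ds
  let b : Int := if 1 < D.length then (D.length : Int) else 2
  ds.foldl (fun a x => a * b + pvRmN ((PySem.List.index? D x).getD 0)) 0

theorem horner_seed (f : Int → Int) (b : Int) (l : List Int) (a : Int) :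
    l.foldl (fun acc x => acc * b + f x) a
    = a * b ^ l.length + l.foldl (fun acc x => acc * b + f x) 0 := by
  induction l generalizing a with
  | nil => simp
  | cons x t ih =>
    simp only [List.foldl_cons, List.length_cons]
    rw [ih (a * b + f x), ih (0 * b + f x)]
    ring

theorem revfold_eq_horner (f : Int → Int) (b : Int) (l : List Int) (a q : Int) :
    l.reverse.foldl (fun (ap : Int × Int) x => (ap.1 + f x * ap.2, ap.2 * b)) (a, q)
    = (a + (l.foldl (fun acc x => acc * b + f x) 0) * q, q * b ^ l.length) := by
  induction l generalizing a q with
  | nil => simp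
  | cons x t ih =>
    simp only [List.reverse_cons, List.foldl_append, List.foldl_cons, List.foldl_nil,
      List.length_cons, ih]
    rw [horner_seed f b t (0 * b + f x)]
    refine Prod.ext ?_ ?_ <;> simp <;> ring

theorem index?_map_some (l : List Int) (x : Int) :
    PySem.List.index? (l.map some) (some x) = PySem.List.index? l x := by
  induction l with
  | nil => rfl
  | cons y t ih =>
    by_cases h : y = x
    · subst h
      rw [List.map_cons, PySem.List.index?_cons_self, PySem.List.index?_cons_self]
    · rw [List.map_cons, PySem.List.index?_cons_of_ne _ (by simpa using h),
        PySem.List.index?_cons_of_ne _ h, ih]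

theorem index?_getElem (l : List Int) (hl : l.Nodup) (r : Nat) (hr : r < l.length) :
    PySem.List.index? l l[r] = some r := by
  have hmem : l[r] ∈ l := List.getElem_mem hr
  have h1 : (PySem.List.index? l l[r]).isSome := by
    rw [PySem.List.index?_isSome_iff]; exact hmem
  obtain ⟨k, hk⟩ := Option.isSome_iff_exists.mp h1
  obtain ⟨hkl, hget, hmin⟩ := PySem.List.getElem_of_index?_eq_some hk
  have : k = r := by
    by_contra hne
    exact hne (hl.getElem_inj_iff.mp hget)
  subst this
  exact hk

-- the digit of x in the swapped order list equals pvRmN of its first-appearance rank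
theorem swap_index_elem (D : List Int) (hDnd : D.Nodup) (d0 d1 : Int) (rest : List Int)
    (hDe : D = d0 :: d1 :: rest) (x : Int) (hx : x ∈ D) :
    (((PySem.List.index? (d1 :: d0 :: rest) x).getD 0 : Nat) : Int)
      = pvRmN ((PySem.List.index? D x).getD 0) := by
  obtain ⟨r, hr, hxr⟩ := List.mem_iff_getElem.mp hx
  have hidx : PySem.List.index? D x = some r := by
    rw [← hxr]; exact index?_getElem D hDnd r hr
  rw [hidx]
  simp only [Option.getD_some]
  subst hDe
  have hne01 : d0 ≠ d1 := by simp [List.nodup_cons] at hDnd; tauto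
  match r, hr, hxr with
  | 0, hr, hxr =>
    simp only [List.getElem_cons_zero] at hxr
    subst hxr
    rw [PySem.List.index?_cons_of_ne _ (by simpa using hne01.symm),
      PySem.List.index?_cons_self]
    simp [pvRmN]
  | 1, hr, hxr =>
    simp only [List.getElem_cons_succ, List.getElem_cons_zero] at hxr
    subst hxr
    rw [PySem.List.index?_cons_self]
    simp [pvRmN]
  | (k+2), hr, hxr =>
    simp only [List.getElem_cons_succ] at hxr
    have hrk : rest[k]'(by simpa using hr) = x := hxr
    have hnx0 : d0 ≠ x := by
      intro h; subst h; simp [List.nodup_cons] at hDnd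
      exact hDnd.1.2 (by rw [← hrk]; exact List.getElem_mem _)
    have hnx1 : d1 ≠ x := by
      intro h; subst h; simp [List.nodup_cons] at hDnd
      exact hDnd.2.1 (by rw [← hrk]; exact List.getElem_mem _)
    rw [PySem.List.index?_cons_of_ne _ hnx1, PySem.List.index?_cons_of_ne _ hnx0]
    have : PySem.List.index? rest x = some k := by
      rw [← hrk]
      exact index?_getElem rest (by simp [List.nodup_cons] at hDnd; tauto) k (by simpa using hr)
    rw [this]
    simp [pvRmN]
    omega

theorem fA_elem (D : List Int) (hDnd : D.Nodup) (d0 d1 : Int) (rest : List Int)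
    (hDe : D = d0 :: d1 :: rest) (x : Int) (hx : x ∈ D) :
    (((PySem.List.index? (some d1 :: some d0 :: rest.map some) (some x)).getD 0 : Nat) : Int)
      = pvRmN ((PySem.List.index? D x).getD 0) := by
  have : (some d1 :: some d0 :: rest.map some) = (d1 :: d0 :: rest).map some := rfl
  rw [this, index?_map_some]
  exact swap_index_elem D hDnd d0 d1 rest hDe x hx

theorem al_core (ds D : List Int) (hDnd : D.Nodup) (hmem : ∀ x ∈ ds, x ∈ D) :
    (ds.reverse.foldl
      (fun (ap : Int × Int) x =>
        (ap.1 + (((PySem.List.index?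
            (if D.length > 1 then
              (List.map some (PySem.List.pySetD (PySem.List.pySetD D 0 (PySem.List.pyGetD D 1 0)) 1 (PySem.List.pyGetD D 0 0)), PySem.List.len D)
             else (none :: List.map some D, 2)).1 (some x)).getD 0 : Nat) : Int) * ap.2,
         ap.2 * (if D.length > 1 then
              (List.map some (PySem.List.pySetD (PySem.List.pySetD D 0 (PySem.List.pyGetD D 1 0)) 1 (PySem.List.pyGetD D 0 0)), PySem.List.len D)
             else (none :: List.map some D, 2)).2))
      (0, 1)).1
    = ds.foldl (fun a x => a * (if 1 < D.length then (D.length : Int) else 2)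
        + pvRmN ((PySem.List.index? D x).getD 0)) 0 := by
  by_cases h : D.length > 1
  · match D, hDnd, hmem, h with
    | d0 :: d1 :: rest, hDnd, hmem, h =>
      have hsw : PySem.List.pySetD (PySem.List.pySetD (d0 :: d1 :: rest) 0
          (PySem.List.pyGetD (d0 :: d1 :: rest) 1 0)) 1
          (PySem.List.pyGetD (d0 :: d1 :: rest) 0 0) = d1 :: d0 :: rest := by simp [pysem]
      simp only [h, if_true, hsw, gt_iff_lt, List.map_cons]
      rw [PySem.List.foldl_congr_mem _ _
        (fun (ap : Int × Int) x => (ap.1 + (pvRmN ((PySem.List.index? (d0 :: d1 :: rest) x).getD 0)) * ap.2,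
          ap.2 * PySem.List.len (d0 :: d1 :: rest))) _
        (by
          intro acc x hx
          have hxD : x ∈ d0 :: d1 :: rest := hmem x (List.mem_reverse.mp hx)
          rw [fA_elem (d0 :: d1 :: rest) hDnd d0 d1 rest rfl x hxD])]
      rw [revfold_eq_horner (fun x => pvRmN ((PySem.List.index? (d0 :: d1 :: rest) x).getD 0))
        (PySem.List.len (d0 :: d1 :: rest)) ds 0 1]
      have h1 : 1 < (d0 :: d1 :: rest).length := h
      simp only [PySem.List.len_eq, h1, if_true]
      simp
  · match D, hDnd, hmem, h with
    | [], _, hmem, _ =>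
      have hds : ds = [] := List.eq_nil_iff_forall_not_mem.mpr
        (fun x hx => by simpa using hmem x hx)
      subst hds
      simp [pvRmN]
    | [v], _, hmem, h =>
      simp only [h, if_false, List.map_cons, List.map_nil, gt_iff_lt]
      rw [PySem.List.foldl_congr_mem _ _
        (fun (ap : Int × Int) x => (ap.1 + (pvRmN ((PySem.List.index? [v] x).getD 0)) * ap.2,
          ap.2 * 2)) _
        (by
          intro acc x hx
          have hxD : x ∈ [v] := hmem x (List.mem_reverse.mp hx)
          have hxv : x = v := by simpa using hxD
          subst hxv
          rw [PySem.List.index?_cons_of_ne _ (by simp)]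
          simp [PySem.List.index?_cons_self, pvRmN])]
      rw [revfold_eq_horner (fun x => pvRmN ((PySem.List.index? [v] x).getD 0)) 2 ds 0 1]
      simp only [List.length_cons, List.length_nil]
      norm_num
    | v :: w :: t, _, _, h => simp at h

theorem al_eq (str : String) : al str = pvVal (str.toList.map myatoi) := by
  simp only [al, pvVal]
  have hDnd : (PySem.Set.ofList (str.toList.map myatoi)).Nodup :=
    PySem.Set.nodup_ofList _
  have hA1 : str.toList.foldl (fun (p : List Int × List Int) c =>
      (p.1 ++ [myatoi c], if myatoi c ∈ p.2 then p.2 else p.2 ++ [myatoi c])) ([], [])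
      = (str.toList.map myatoi, PySem.Set.ofList (str.toList.map myatoi)) := by
    rw [PySem.List.foldl_prod_mk (f := fun acc c => acc ++ [myatoi c])
      (g := fun acc c => if myatoi c ∈ acc then acc else acc ++ [myatoi c])]
    refine Prod.ext ?_ ?_
    · rw [PySem.List.foldl_append_singleton_eq_map]; simp
    · show _ = PySem.Set.ofList (str.toList.map myatoi)
      rw [← PySem.Set.update_empty, PySem.Set.update_map_eq_foldl_add]
      apply PySem.List.foldl_congr_mem
      intro acc c _
      rw [PySem.Set.add_eq_ite]
  rw [hA1]
  exact al_core (str.toList.map myatoi) _ hDnd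
    (fun x hx => (PySem.Set.mem_ofList _ _).mpr hx)

-- B's divide-and-conquer returns (Horner value, b ^ length) whenever the dict agrees with f on l
theorem bev_eq (d : PySem.Dict Int Int) (b : Int) (f : Int → Int) :
    ∀ (n : Nat) (l : List Int), l.length = n → (∀ x ∈ l, d.getD x 0 = f x) →
    bev d b l = (l.foldl (fun a x => a * b + f x) 0, b ^ l.length) := by
  intro n
  induction n using Nat.strong_induction_on with
  | _ n ih =>
    intro l hl hf
    rw [bev]
    by_cases h1 : l.length ≤ 1
    · simp only [h1, dif_pos]
      match l, h1, hf with
      | [], _, _ => simp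
      | [x], _, hf => simp [hf x (by simp)]
    · simp only [h1, dif_neg, not_false_iff]
      have hmlt : l.length / 2 < l.length := by omega
      have ht : (l.take (l.length / 2)).length = l.length / 2 := by
        simp [List.length_take]; omega
      have hd : (l.drop (l.length / 2)).length = l.length - l.length / 2 := by
        simp [List.length_drop]
      rw [ih (l.take (l.length / 2)).length (by omega) _ rfl
          (fun x hx => hf x (List.mem_of_mem_take hx)),
        ih (l.drop (l.length / 2)).length (by omega) _ rfl
          (fun x hx => hf x (List.mem_of_mem_drop hx))]
      have hsplit : l = l.take (l.length / 2) ++ l.drop (l.length / 2) :=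
        (List.take_append_drop _ l).symm
      simp only [Prod.mk.injEq]
      refine ⟨?_, ?_⟩
      · conv_rhs =>
          rw [hsplit, List.foldl_append,
            horner_seed f b (l.drop (l.length / 2))
              (List.foldl (fun a x => a * b + f x) 0 (l.take (l.length / 2)))]
      · rw [ht, hd, ← pow_add]
        congr 1
        omega

theorem al_alt_eq (str : String) : al_alt str = pvVal (str.toList.map myatoi) := by
  simp only [al_alt, pvVal]
  set ds := str.toList.map myatoi with hds
  set D := PySem.Set.ofList ds with hD
  have hDnd : D.Nodup := PySem.Set.nodup_ofList ds
  by_cases h2 : D.length < 2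
  · simp only [h2, if_pos]
    have hb : (if 1 < D.length then (D.length : Int) else 2) = 2 := by
      rw [if_neg]; omega
    rw [hb]
    rw [bev_eq _ 2 (fun x => pvRmN ((PySem.List.index? D x).getD 0)) ds.length ds rfl ?hagree]
    case hagree =>
      intro x hx
      have hxD : x ∈ D := by rw [hD, PySem.Set.mem_ofList]; exact hx
      match D, hDnd, h2, hxD with
      | [v], _, _, hxD =>
        have hxv : x = v := by simpa using hxD
        subst hxv
        rw [PySem.Dict.getD_of_mem_items (v := 1) _ (by simp [PySem.Dict.ofList, PySem.Dict.update, PySem.Dict.empty, PySem.Dict.insert, PySem.Dict.items, PySem.Dict.contains])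
            (by simp [PySem.Dict.ofList, PySem.Dict.update, PySem.Dict.empty, PySem.Dict.insert, PySem.Dict.keys, PySem.Dict.items, PySem.Dict.contains])]
        simp [PySem.List.index?_cons_self, pvRmN]
      | [], _, _, hxD => simp at hxD
      | a :: b :: t, _, h2, _ => simp at h2
  · simp only [h2, if_neg, not_false_iff]
    have hb : (if 1 < D.length then (D.length : Int) else 2) = (D.length : Int) := by
      rw [if_pos]; omega
    rw [hb]
    match D, hDnd, h2 with
    | d0 :: d1 :: rest, hDnd, _ =>
      have hmem : ∀ x ∈ ds, x ∈ d0 :: d1 :: rest := by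
        intro x hx
        rw [hD]
        exact (PySem.Set.mem_ofList ds x).mpr hx
      rw [bev_eq _ _ (fun x => pvRmN ((PySem.List.index? (d0 :: d1 :: rest) x).getD 0)) ds.length ds rfl ?hag]
      case hag =>
        intro x hx
        have hxD : x ∈ d0 :: d1 :: rest := hmem x hx
        -- digit.getD x 0 = index of x in d1 :: d0 :: rest
        have hnd' : (d1 :: d0 :: rest).Nodup := by
          have : (d0 :: d1 :: rest).Perm (d1 :: d0 :: rest) := List.Perm.swap _ _ _
          exact this.nodup hDnd
        have hx' : x ∈ d1 :: d0 :: rest := by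
          have : (d0 :: d1 :: rest).Perm (d1 :: d0 :: rest) := List.Perm.swap _ _ _
          exact this.mem_iff.mp hxD
        obtain ⟨r, hr, hxr⟩ := List.mem_iff_getElem.mp hx'
        have hidx' : PySem.List.index? (d1 :: d0 :: rest) x = some r := by
          rw [← hxr]; exact index?_getElem _ hnd' r hr
        have hkeys : (PySem.Dict.ofList ((d1 :: d0 :: rest).zipIdx.map
            (fun q => (q.1, (q.2 : Int))))).keys.Nodup := by
          show (List.map (fun p => p.1) (PySem.Dict.ofList ((d1 :: d0 :: rest).zipIdx.map
            (fun q => (q.1, (q.2 : Int))))).items).Nodup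
          unfold PySem.Dict.ofList PySem.Dict.update
          rw [PySem.Dict.items_foldl_insert_fresh _ Prod.fst Prod.snd _
            (fun a _ => PySem.Dict.contains_empty a.1)
            (by
              rw [List.map_map]
              have h9 : (Prod.fst ∘ fun q : Int × Nat => (q.1, (q.2 : Int))) = Prod.fst := rfl
              rw [h9, List.zipIdx_map_fst]
              exact hnd')]
          simp only [PySem.Dict.empty, PySem.Dict.items, List.nil_append, List.map_map]
          have h9 : ((fun p : Int × Int => p.1) ∘ (fun a : Int × Int => (a.1, a.2)) ∘ (fun q : Int × Nat => (q.1, (q.2 : Int)))) = Prod.fst := rfl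
          rw [h9, List.zipIdx_map_fst]
          exact hnd'
        have hmemit : (x, (r : Int)) ∈ (PySem.Dict.ofList ((d1 :: d0 :: rest).zipIdx.map
            (fun q => (q.1, (q.2 : Int))))).items := by
          unfold PySem.Dict.ofList PySem.Dict.update
          rw [PySem.Dict.items_foldl_insert_fresh _ Prod.fst Prod.snd _
            (fun a _ => PySem.Dict.contains_empty a.1)
            (by
              rw [List.map_map]
              have h9 : (Prod.fst ∘ fun q : Int × Nat => (q.1, (q.2 : Int))) = Prod.fst := rfl
              rw [h9, List.zipIdx_map_fst]
              exact hnd')]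
          simp only [PySem.Dict.empty, PySem.Dict.items, List.nil_append, List.map_map, List.mem_map]
          have hzmem : ((d1 :: d0 :: rest)[r], r) ∈ (d1 :: d0 :: rest).zipIdx := by
            have h2r : r < (d1 :: d0 :: rest).zipIdx.length := by simpa using hr
            have h3 := List.getElem_zipIdx (l := d1 :: d0 :: rest) (i := r) (h := h2r)
            simp only [Nat.zero_add] at h3
            rw [← h3]
            exact List.getElem_mem h2r
          exact ⟨((d1 :: d0 :: rest)[r], r), hzmem, by simp [Function.comp, hxr]⟩
        rw [PySem.Dict.getD_of_mem_items _ hmemit hkeys]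
        have := swap_index_elem (d0 :: d1 :: rest) hDnd d0 d1 rest rfl x hxD
        rw [hidx'] at this
        simpa using this

-- ===== VERDICT (by name: the statement is the Claim_ definition above) =====
theorem al_spec : Claim_equal_al := by
  intro str _
  unfold Spec_al
  rw [al_eq, al_alt_eq]
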